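-- pv_equiv track=rewrite | github.com/Grinfield/virtcdp | virtcdp/utils.py | format_cpu_spec
-- ===== SOURCE A (Python) =====
-- def format_cpu_spec(cpuset, allow_ranges=True):
--     """Format a libvirt CPU range specification.
--
--     Format a set/list of CPU indexes as a libvirt CPU range
--     specification. It allow_ranges is true, it will try to detect
--     continuous ranges of CPUs, otherwise it will just list each CPU
--     index explicitly.
--
--     :param cpuset: set (or list) of CPU indexes
--
--     :returns: a formatted CPU range string
--     """
--     # We attempt to detect ranges, but don't bother with
--     # trying to do range negations to minimize the overall
--     # spec string length
--     if allow_ranges: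
--         ranges = []
--         previndex = None
--         for cpuindex in sorted(cpuset):
--             if previndex is None or previndex != (cpuindex - 1):
--                 ranges.append([])
--             ranges[-1].append(cpuindex)
--             previndex = cpuindex
--
--         parts = []
--         for entry in ranges:
--             if len(entry) == 1:
--                 parts.append(str(entry[0]))
--             else:
--                 parts.append("%d-%d" % (entry[0], entry[len(entry) - 1]))
--         return ",".join(parts)
--     else:
--         return ",".join(str(id) for id in sorted(cpuset))
-- ===== SOURCE B (Python) =====
-- def format_cpu_spec(cpuset, allow_ranges=True):
--     """Format a libvirt CPU range specification (single-pass run tracker)."""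
--     if allow_ranges:
--         parts = []
--         start = prev = None
--         for cpuindex in sorted(cpuset):
--             if start is None:
--                 start = prev = cpuindex
--             elif cpuindex == prev + 1:
--                 prev = cpuindex
--             else:
--                 parts.append(str(start) if start == prev else "%d-%d" % (start, prev))
--                 start = prev = cpuindex
--         if start is not None:
--             parts.append(str(start) if start == prev else "%d-%d" % (start, prev))
--         return ",".join(parts)
--     else:
--         return ",".join(str(id) for id in sorted(cpuset))
-- ===== Notes on version B (the rewrite author's own statement) =====
-- stated objective: simpler
-- what changed: Replaces A's two-pass build (a list of index-group lists, mutated via ranges[-1].append, then a second formatting loop) with a single pass over sorted(cpuset) that tracks only two scalars (start, prev) and emits each run's string as soon as it closes.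
import Mathlib
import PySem

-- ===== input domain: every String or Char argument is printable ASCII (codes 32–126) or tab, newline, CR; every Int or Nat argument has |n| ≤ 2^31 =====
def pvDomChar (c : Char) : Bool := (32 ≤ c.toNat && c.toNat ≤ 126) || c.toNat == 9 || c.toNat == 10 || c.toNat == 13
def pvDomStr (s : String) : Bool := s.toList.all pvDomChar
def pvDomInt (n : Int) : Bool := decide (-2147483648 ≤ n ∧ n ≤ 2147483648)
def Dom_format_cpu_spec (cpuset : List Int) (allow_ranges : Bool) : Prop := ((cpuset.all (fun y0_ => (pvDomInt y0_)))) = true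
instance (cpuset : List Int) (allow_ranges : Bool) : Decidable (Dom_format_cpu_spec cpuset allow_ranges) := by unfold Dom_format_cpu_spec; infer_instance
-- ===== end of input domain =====

-- B replaces A's two-pass group-list build with a single pass tracking two scalars (start, prev): simpler.

-- ===== PORT A =====
-- ranges[-1].append(cpuindex): the loop guarantees ranges is nonempty; getLastD [] is exact there
def pvAppendLast (rs : List (List Int)) (x : Int) : List (List Int) :=
  rs.dropLast ++ [rs.getLastD [] ++ [x]]

-- the 'for cpuindex in sorted(cpuset)' loop, state = (ranges, previndex)
def pvALoop : List Int → List (List Int) → Option Int → List (List Int)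
  | [], ranges, _ => ranges
  | x :: rest, ranges, prev =>
      let ranges' := if (match prev with | none => true | some p => decide (p ≠ x - 1))
                     then ranges ++ [[]] else ranges
      pvALoop rest (pvAppendLast ranges' x) (some x)

-- the second loop over ranges: entry[0] / entry[len(entry)-1]; entries are never empty, headD/getLastD 0 is exact
def pvFmtEntry (entry : List Int) : String :=
  if entry.length == 1 then PySem.Int.toStr (entry.headD 0)
  else PySem.Int.toStr (entry.headD 0) ++ "-" ++ PySem.Int.toStr (entry.getLastD 0)

def format_cpu_spec (cpuset : List Int) (allow_ranges : Bool) : String :=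
  if allow_ranges then
    let ranges := pvALoop (PySem.List.sorted cpuset (fun x => x)) [] none
    PySem.Str.join "," (ranges.map pvFmtEntry)
  else
    PySem.Str.join "," ((PySem.List.sorted cpuset (fun x => x)).map PySem.Int.toStr)

-- ===== PORT B =====
def pvFmtRun (s p : Int) : String :=
  if s == p then PySem.Int.toStr s else PySem.Int.toStr s ++ "-" ++ PySem.Int.toStr p

-- single pass, state = (parts, (start, prev)); flush the open run at the end
def pvBLoop : List Int → List String → Option (Int × Int) → List String
  | [], parts, run =>
      (match run with | none => parts | some (s, p) => parts ++ [pvFmtRun s p])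
  | x :: rest, parts, run =>
      match run with
      | none => pvBLoop rest parts (some (x, x))
      | some (s, p) =>
        if x == p + 1 then pvBLoop rest parts (some (s, x))
        else pvBLoop rest (parts ++ [pvFmtRun s p]) (some (x, x))

def format_cpu_spec_alt (cpuset : List Int) (allow_ranges : Bool) : String :=
  if allow_ranges then
    PySem.Str.join "," (pvBLoop (PySem.List.sorted cpuset (fun x => x)) [] none)
  else
    PySem.Str.join "," ((PySem.List.sorted cpuset (fun x => x)).map PySem.Int.toStr)

-- ===== PRECONDITION & SPEC =====
def Spec_format_cpu_spec (cpuset : List Int) (allow_ranges : Bool) (out : String) : Prop := out = format_cpu_spec_alt cpuset allow_ranges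
instance (cpuset : List Int) (allow_ranges : Bool) (out : String) : Decidable (Spec_format_cpu_spec cpuset allow_ranges out) := by unfold Spec_format_cpu_spec; infer_instance

-- ===== CLAIM (what is proved, stated in full; the proofs are below) =====
def Claim_equal_format_cpu_spec : Prop := ∀ (cpuset : List Int) (allow_ranges : Bool), Dom_format_cpu_spec cpuset allow_ranges → Spec_format_cpu_spec cpuset allow_ranges (format_cpu_spec cpuset allow_ranges)

-- ===== LEMMAS AND PROOFS =====

-- invariant: A's trailing group grp has head s, last p, s ≤ p, and is a singleton iff s = p
lemma pvFmt_agree (grp : List Int) (s p : Int)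
    (hh : grp.headD 0 = s) (hl : grp.getLastD 0 = p)
    (hone : grp.length = 1 ↔ s = p) :
    pvFmtEntry grp = pvFmtRun s p := by
  unfold pvFmtEntry pvFmtRun
  by_cases h : grp.length = 1
  · have hsp := hone.mp h
    simp only [List.headD_eq_head?] at hh
    simp [h, hh, hsp]
  · have hsp : ¬ s = p := fun hsp => h (hone.mpr hsp)
    simp only [List.headD_eq_head?, List.getLastD_eq_getLast?] at hh hl
    simp [h, hh, hl, hsp]

lemma pvLoop_agree : ∀ (l : List Int) (G : List (List Int)) (parts : List String)
    (grp : List Int) (s p : Int),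
    parts = G.map pvFmtEntry →
    grp.headD 0 = s → grp.getLastD 0 = p → s ≤ p → (grp.length = 1 ↔ s = p) → grp ≠ [] →
    (pvALoop l (G ++ [grp]) (some p)).map pvFmtEntry = pvBLoop l parts (some (s, p))
  | [], G, parts, grp, s, p, hparts, hh, hl, hsp, hone, hne => by
      simp [pvALoop, pvBLoop, hparts, pvFmt_agree grp s p hh hl hone]
  | x :: rest, G, parts, grp, s, p, hparts, hh, hl, hsp, hone, hne => by
      simp only [pvALoop, pvBLoop]
      by_cases hc : p = x - 1
      · -- run continues: x = p + 1
        have hx : (x == p + 1) = true := by simp; omega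
        rw [if_pos hx, if_neg (show ¬ ((match some p with
              | none => true | some q => decide (q ≠ x - 1)) = true) by simp [hc])]
        rw [show pvAppendLast (G ++ [grp]) x = G ++ [grp ++ [x]] by simp [pvAppendLast]]
        apply pvLoop_agree rest G parts (grp ++ [x]) s x hparts
        · obtain ⟨a, t, rfl⟩ := List.exists_cons_of_ne_nil hne
          simpa using hh
        · simp
        · omega
        · have hlen : 0 < grp.length := List.length_pos_iff.mpr hne
          constructor
          · intro h1
            have h2 : grp.length + 1 = 1 := by simpa using h1
            omega
          · intro hsx; exfalso; omega
        · simp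
      · -- run breaks: flush the finished group
        have hx : ¬ ((x == p + 1) = true) := by simp; omega
        rw [if_neg hx, if_pos (show (match some p with
              | none => true | some q => decide (q ≠ x - 1)) = true by simp [hc])]
        rw [show pvAppendLast ((G ++ [grp]) ++ [[]]) x = (G ++ [grp]) ++ [[x]] by
              simp [pvAppendLast]]
        apply pvLoop_agree rest (G ++ [grp]) (parts ++ [pvFmtRun s p]) [x] x x
        · simp [hparts, pvFmt_agree grp s p hh hl hone]
        · simp
        · simp
        · exact le_refl x
        · simp
        · simp

lemma pvLoop_agree_start : ∀ (l : List Int),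
    (pvALoop l [] none).map pvFmtEntry = pvBLoop l [] none
  | [] => by simp [pvALoop, pvBLoop]
  | x :: rest => by
      have hA : pvALoop (x :: rest) [] none = pvALoop rest ([] ++ [[x]]) (some x) := by
        simp [pvALoop, pvAppendLast]
      have hB : pvBLoop (x :: rest) [] none = pvBLoop rest [] (some (x, x)) := by
        simp [pvBLoop]
      rw [hA, hB]
      exact pvLoop_agree rest [] [] [x] x x rfl (by simp) (by simp) le_rfl (by simp) (by simp)

-- ===== VERDICT (by name: the statement is the Claim_ definition above) =====
theorem format_cpu_spec_spec : Claim_equal_format_cpu_spec := by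
  intro cpuset allow_ranges _
  unfold Spec_format_cpu_spec format_cpu_spec format_cpu_spec_alt
  cases allow_ranges
  · rfl
  · rw [if_pos rfl, if_pos rfl]
    show PySem.Str.join "," ((pvALoop (PySem.List.sorted cpuset (fun x => x)) [] none).map pvFmtEntry) = _
    rw [pvLoop_agree_start]
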